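-- pv_equiv track=rewrite | github.com/Schlicklab/Dual-RAG-IF | dualRAGIF.py | sequenceToDB
-- ===== SOURCE A (Python) =====
-- def sequenceToDB(orderSeqs):
--     DBs = []
--     for s in orderSeqs:
--         seq = s
--         DB = []
--         perm = {}
--         takenList = []
--         for n in seq:
--             if n in perm:
--                 pass
--             else:
--                 perm[n] = 'H'
--                 w1 = seq.find(n)
--                 w2 = seq.find(n, w1+1)
--                 for i in range(w1+1, w2):
--                     if int(seq[i:i+1]) < int(n):
--                         if perm[seq[i]] == 'PK':
--                             perm[n] = 'NPK'
--                             break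
--                         else:
--                             perm[n] = 'PK'
--         for n in seq:
--             if perm[n] == 'H':
--                 if n not in takenList:
--                     DB.append('(')
--                     takenList.append(n)
--                 else:
--                     DB.append(')')
--             elif perm[n] == 'PK':
--                 if n not in takenList:
--                     DB.append('<')
--                     takenList.append(n)
--                 else:
--                     DB.append('>')
--             else:
--                 if n not in takenList:
--                     DB.append('[')
--                     takenList.append(n)
--                 else:
--                     DB.append(']')
-- #        DBs.append('.'+'.'.join(DB)+'.')
--         DBs.append(''.join(DB))
--     return DBs
-- ===== SOURCE B (Python) =====
-- BRACKETS = {'H': '()', 'PK': '<>', 'NPK': '[]'}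
--
--
-- def sequenceToDB(orderSeqs):
--     results = []
--     for seq in orderSeqs:
--         # full occurrence index: symbol -> all its positions (first-occurrence order)
--         pos = {}
--         for i, c in enumerate(seq):
--             pos.setdefault(c, []).append(i)
--         # classify the DISTINCT symbols, in first-occurrence order
--         label = {}
--         for c, ps in pos.items():
--             lab = 'H'
--             if len(ps) > 1 and ps[1] - ps[0] > 1:
--                 a, b = ps[0], ps[1]
--                 v = int(c)
--                 kinds = {label[m] for m in label
--                          if any(a < p < b for p in pos[m]) and int(m) < v}
--                 if 'PK' in kinds:
--                     lab = 'NPK'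
--                 elif kinds:
--                     lab = 'PK'
--             label[c] = lab
--         # paint the brackets directly at each symbol's positions
--         chars = [''] * len(seq)
--         for c, ps in pos.items():
--             op, cl = BRACKETS[label[c]]
--             chars[ps[0]] = op
--             for p in ps[1:]:
--                 chars[p] = cl
--         results.append(''.join(chars))
--     return results
-- ===== Notes on version B (the rewrite author's own statement) =====
-- stated objective: alternative
-- what changed: Instead of A's two char-by-char passes (classify each char via str.find and an inner break-loop, then emit via an if/elif chain and a takenList), B builds one full positions index, classifies only the DISTINCT symbols in first-occurrence order with a declarative set comprehension over previously labelled symbols, and produces the output by painting brackets directly into a preallocated array at each symbol's positions (open at first, close at the rest).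
-- outside the precondition, e.g. on sequenceToDB(['xx12132x3']): A returns ['()(<)[>)]'], B raises ValueError
import Mathlib
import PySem

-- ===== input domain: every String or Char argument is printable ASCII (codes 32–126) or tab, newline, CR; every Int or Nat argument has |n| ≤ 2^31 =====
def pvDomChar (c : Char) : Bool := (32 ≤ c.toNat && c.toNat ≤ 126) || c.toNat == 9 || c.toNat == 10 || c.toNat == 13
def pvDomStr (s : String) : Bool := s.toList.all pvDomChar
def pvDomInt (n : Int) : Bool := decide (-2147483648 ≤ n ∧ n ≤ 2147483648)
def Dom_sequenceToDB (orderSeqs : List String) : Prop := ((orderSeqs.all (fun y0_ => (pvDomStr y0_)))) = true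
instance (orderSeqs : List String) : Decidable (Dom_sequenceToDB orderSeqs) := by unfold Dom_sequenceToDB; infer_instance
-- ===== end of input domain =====

-- B replaces A's two char-by-char passes (find-based classification with a break-loop, then
-- emission via an if/elif chain and a takenList) by: one positions index, classification of the
-- DISTINCT symbols only, and painting brackets directly into a preallocated array by position
-- (objective: alternative decomposition, same cost).

-- ===== PORT A =====

-- int(seq[i:i+1]) totalized with default 0; exact wherever Python's int() returns (inside Pre_)
def pvIntAt (seq : List Char) (i : Int) : Int :=
  (PySem.Int.ofChars? (PySem.List.slice seq (some i) (some (i + 1)))).getD 0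

-- int(n) for a single character, totalized with default 0; exact inside Pre_
def pvIntCh (n : Char) : Int := (PySem.Int.ofChars? [n]).getD 0

-- the inner 'for i in range(w1+1, w2)' loop of A, carrying perm; early 'break' returns at once.
-- perm[seq[i]] is read as getD with default "" (KeyError excluded by Pre_).
def pvLoopA (seq : List Char) (n : Char) : List Int → PySem.Dict Char String → PySem.Dict Char String
  | [], perm => perm
  | i :: rest, perm =>
    if pvIntAt seq i < pvIntCh n then
      if perm.getD (PySem.List.pyGetD seq i ' ') "" == "PK" then perm.insert n "NPK"
      else pvLoopA seq n rest (perm.insert n "PK")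
    else pvLoopA seq n rest perm

-- one step of A's first 'for n in seq' loop
def pvPermStep (seq : List Char) (perm : PySem.Dict Char String) (n : Char) : PySem.Dict Char String :=
  if perm.contains n then perm
  else
    let perm1 := perm.insert n "H"
    let w1 := PySem.Chars.find seq [n]
    let w2 := PySem.Chars.findFrom seq [n] (w1 + 1) none
    pvLoopA seq n (PySem.List.pyRange (w1 + 1) w2 1) perm1

-- one step of A's second 'for n in seq' loop; state = (DB, takenList); perm[n] read as getD ""
-- (n is always a key of perm after the first loop)
def pvEmitStep (perm : PySem.Dict Char String) (st : List (List Char) × List Char) (n : Char) :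
    List (List Char) × List Char :=
  if perm.getD n "" == "H" then
    if !st.2.contains n then (st.1 ++ [['(']], st.2 ++ [n]) else (st.1 ++ [[')']], st.2)
  else if perm.getD n "" == "PK" then
    if !st.2.contains n then (st.1 ++ [['<']], st.2 ++ [n]) else (st.1 ++ [['>']], st.2)
  else
    if !st.2.contains n then (st.1 ++ [['[']], st.2 ++ [n]) else (st.1 ++ [[']']], st.2)

-- the body of A's outer loop for one string s
def pvSeqA (s : String) : String :=
  let seq := s.toList
  let perm := seq.foldl (pvPermStep seq) PySem.Dict.empty
  let st := seq.foldl (pvEmitStep perm) ([], [])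
  String.ofList (PySem.Chars.join [] st.1)

def sequenceToDB (orderSeqs : List String) : List String :=
  orderSeqs.foldl (fun DBs s => DBs ++ [pvSeqA s]) []

-- ===== PORT B =====

-- the module-level table BRACKETS of Source B (2-char strings as char lists)
def pvBRACKETS : PySem.Dict String (List Char) :=
  PySem.Dict.ofList [("H", ['(', ')']), ("PK", ['<', '>']), ("NPK", ['[', ']'])]

-- Source B's positions index: pos.setdefault(c, []).append(i) is Dict.modify c [] (· ++ [i])
def pvOccB (seq : List Char) : PySem.Dict Char (List Int) :=
  (PySem.List.enumerate seq 0).foldl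
    (fun occ p => occ.modify p.2 [] (· ++ [p.1])) PySem.Dict.empty

-- one step of Source B's classification loop over pos.items(); dict reads totalized with defaults
def pvClsStep (occ : PySem.Dict Char (List Int)) (label : PySem.Dict Char String)
    (item : Char × List Int) : PySem.Dict Char String :=
  let c := item.1
  let ps := item.2
  let lab : String :=
    if 1 < ps.length ∧ 1 < PySem.List.pyGetD ps 1 0 - PySem.List.pyGetD ps 0 0 then
      let a := PySem.List.pyGetD ps 0 0
      let b := PySem.List.pyGetD ps 1 0
      let v := pvIntCh c
      let kinds : PySem.Set String := PySem.Set.ofList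
        ((label.keys.filter (fun m =>
            ((occ.getD m []).any (fun p => decide (a < p) && decide (p < b))) &&
            decide (pvIntCh m < v))).map (fun m => label.getD m ""))
      if kinds.contains "PK" then "NPK" else if !kinds.isEmpty then "PK" else "H"
    else "H"
  label.insert c lab

-- one step of Source B's painting loop: op, cl = BRACKETS[label[c]] (a 2-char string, indexed 0/1),
-- chars[ps[0]] = op, chars[p] = cl for p in ps[1:]
def pvPaintStep (label : PySem.Dict Char String) (chars : List (List Char))
    (item : Char × List Int) : List (List Char) :=
  let ps := item.2
  let br := pvBRACKETS.getD (label.getD item.1 "") []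
  let op := PySem.List.pyGetD br 0 ' '
  let cl := PySem.List.pyGetD br 1 ' '
  let chars1 := PySem.List.pySetD chars (PySem.List.pyGetD ps 0 0) [op]
  (PySem.List.slice ps (some 1) none).foldl (fun ch p => PySem.List.pySetD ch p [cl]) chars1

-- the body of Source B's outer loop for one string
def pvSeqB (s : String) : String :=
  let seq := s.toList
  let occ := pvOccB seq
  let label := occ.items.foldl (pvClsStep occ) PySem.Dict.empty
  let chars := occ.items.foldl (pvPaintStep label) (List.replicate seq.length [])
  String.ofList (PySem.Chars.join [] chars)

def sequenceToDB_alt (orderSeqs : List String) : List String :=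
  orderSeqs.foldl (fun rs s => rs ++ [pvSeqB s]) []

-- ===== PRECONDITION & SPEC =====

-- Pre_ excludes exactly the inputs where A raises (ValueError from int() on a non-digit inside a
-- span between a symbol's first two occurrences, KeyError from perm[seq[i]] on a not-yet-classified
-- smaller inner symbol) together with the rare sequences where only A's early 'break' on a PK inner
-- skips such an error position — there A returns but B's declarative scan raises.
def pvPreStr (cs : List Char) : Bool :=
  (List.range cs.length).all fun p =>
    (List.range cs.length).all fun q =>
      (List.range cs.length).all fun i =>
        !(decide (p < i) && decide (i < q) && (cs.getD p ' ' == cs.getD q ' ') &&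
            !(cs.take p).contains (cs.getD p ' ') &&
            !((cs.drop (p + 1)).take (q - (p + 1))).contains (cs.getD p ' ')) ||
          (PySem.Chars.isdigit (cs.getD i ' ') && PySem.Chars.isdigit (cs.getD p ' ') &&
            (!decide (pvIntCh (cs.getD i ' ') < pvIntCh (cs.getD p ' ')) ||
              (cs.take p).contains (cs.getD i ' ')))

def Pre_sequenceToDB (orderSeqs : List String) : Prop :=
  ∀ s ∈ orderSeqs, pvPreStr s.toList = true

instance (orderSeqs : List String) : Decidable (Pre_sequenceToDB orderSeqs) := by
  unfold Pre_sequenceToDB; infer_instance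

def pvWitness_sequenceToDB : List String := ["1212"]

def Spec_sequenceToDB (orderSeqs : List String) (out : List String) : Prop := out = sequenceToDB_alt orderSeqs
instance (orderSeqs : List String) (out : List String) : Decidable (Spec_sequenceToDB orderSeqs out) := by unfold Spec_sequenceToDB; infer_instance

-- ===== CLAIM (what is proved, stated in full; the proofs are below) =====
def Claim_equal_sequenceToDB : Prop := ∀ (orderSeqs : List String), Dom_sequenceToDB orderSeqs → Pre_sequenceToDB orderSeqs → Spec_sequenceToDB orderSeqs (sequenceToDB orderSeqs)

-- ===== LEMMAS AND PROOFS =====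

-- positions of character c in seq (all of them, in increasing order), as Python ints
def pvPosL (seq : List Char) (c : Char) : List Int :=
  ((PySem.List.enumerate seq 0).filter (fun p => p.2 == c)).map (·.1)

-- the three labels A's classification can produce
def pvTrip (v : String) : Prop := v = "H" ∨ v = "PK" ∨ v = "NPK"

-- the index span range(w1+1, w2) of A's inner loop
def pvSpan (seq : List Char) (n : Char) : List Int :=
  PySem.List.pyRange (PySem.Chars.find seq [n] + 1)
    (PySem.Chars.findFrom seq [n] (PySem.Chars.find seq [n] + 1) none) 1

-- the label A's inner loop assigns, written as one expression over the span
def pvLabAux (seq : List Char) (perm : PySem.Dict Char String) (n : Char) (I : List Int)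
    (v : String) : String :=
  let inner := (I.filter (fun i => pvIntAt seq i < pvIntCh n)).map
      (fun i => perm.getD (PySem.List.pyGetD seq i ' ') "")
  if inner.contains "PK" then "NPK" else if !inner.isEmpty then "PK" else v

def pvLabD (seq : List Char) (perm : PySem.Dict Char String) (n : Char) : String :=
  pvLabAux seq perm n (pvSpan seq n) "H"

-- A's phase-1 dict after a prefix
def pvP1 (seq pre : List Char) : PySem.Dict Char String :=
  pre.foldl (pvPermStep seq) PySem.Dict.empty

def pvOpenC (v : String) : List Char := if v == "H" then ['('] else if v == "PK" then ['<'] else ['[']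
def pvCloseC (v : String) : List Char := if v == "H" then [')'] else if v == "PK" then ['>'] else [']']

theorem pv_mem_posL {seq : List Char} {c : Char} {i : Int} :
    i ∈ pvPosL seq c ↔ ∃ k : Nat, i = (k : Int) ∧ seq[k]? = some c := by
  unfold pvPosL
  simp only [List.mem_map, List.mem_filter, PySem.List.mem_enumerate_iff]
  constructor
  · rintro ⟨p, ⟨⟨k, hk, rfl⟩, hc⟩, rfl⟩
    exact ⟨k, by simp, by simpa [hk] using (eq_of_beq hc)⟩
  · rintro ⟨k, rfl, hc⟩
    rw [List.getElem?_eq_some_iff] at hc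
    obtain ⟨hk, hck⟩ := hc
    exact ⟨(0 + (k : Int), seq[k]), ⟨⟨k, hk, rfl⟩, by simp [hck]⟩, by simp⟩

theorem pv_posL_pairwise (seq : List Char) (c : Char) : (pvPosL seq c).Pairwise (· < ·) := by
  unfold pvPosL
  rw [List.pairwise_map]
  exact (PySem.List.pairwise_lt_enumerate seq 0).filter _

theorem pv_posL_nil_iff {seq : List Char} {c : Char} : pvPosL seq c = [] ↔ c ∉ seq := by
  constructor
  · intro h hc
    obtain ⟨k, hk, hck⟩ := List.mem_iff_getElem.mp hc
    have : (k : Int) ∈ pvPosL seq c := pv_mem_posL.mpr ⟨k, rfl, by simp [hk, hck]⟩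
    simp [h] at this
  · intro hc
    by_contra h
    obtain ⟨i, hi⟩ := List.exists_mem_of_ne_nil _ h
    obtain ⟨k, rfl, hk⟩ := pv_mem_posL.mp hi
    exact hc (List.mem_of_getElem? hk)

theorem pv_prefix_drop {seq : List Char} {c : Char} {k : Nat} :
    [c] <+: seq.drop k ↔ seq[k]? = some c := by
  rw [← List.head?_drop]
  cases seq.drop k with
  | nil => simp
  | cons a t => simp [List.cons_prefix_cons, eq_comm]

theorem pv_find_eq_head {seq : List Char} {c : Char} {i : Int} {t : List Int}
    (h : pvPosL seq c = i :: t) : PySem.Chars.find seq [c] = i := by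
  have hmem : i ∈ pvPosL seq c := by rw [h]; simp
  obtain ⟨k, rfl, hk⟩ := pv_mem_posL.mp hmem
  have hpre : [c] <+: seq.drop k := pv_prefix_drop.mpr hk
  have hinf : PySem.Chars.isIn [c] seq = true :=
    (PySem.Chars.exists_prefix_drop_iff_isIn [c] seq).mp ⟨k, hpre⟩
  have hnn : 0 ≤ PySem.Chars.find seq [c] :=
    (PySem.Chars.find_nonneg_iff seq [c]).mpr ((PySem.Chars.isIn_iff_infix [c] seq).mp hinf)
  obtain ⟨hfp, hmin⟩ := PySem.Chars.find_spec hnn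
  have hfk : seq[(PySem.Chars.find seq [c]).toNat]? = some c := pv_prefix_drop.mp hfp
  have hfmem : PySem.Chars.find seq [c] ∈ pvPosL seq c :=
    pv_mem_posL.mpr ⟨(PySem.Chars.find seq [c]).toNat, by omega, hfk⟩
  have hkf : PySem.Chars.find seq [c] ≤ (k : Int) := by
    by_contra hlt
    rw [not_le] at hlt
    exact hmin k (by omega) hpre
  have hpw := pv_posL_pairwise seq c
  rw [h] at hpw hfmem
  rcases List.mem_cons.mp hfmem with heq | hft
  · exact heq
  · have := (List.pairwise_cons.mp hpw).1 _ hft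
    omega

theorem pv_find_none {seq : List Char} {c : Char} (h : pvPosL seq c = []) :
    PySem.Chars.find seq [c] = -1 := by
  have hc : c ∉ seq := pv_posL_nil_iff.mp h
  rw [PySem.Chars.find_eq_neg_one_iff]
  intro hinf
  obtain ⟨j, hj⟩ := (PySem.Chars.exists_prefix_drop_iff_isIn [c] seq).mpr
    ((PySem.Chars.isIn_iff_infix [c] seq).mpr hinf)
  exact hc (List.mem_of_getElem? (pv_prefix_drop.mp hj))

theorem pv_findFrom_none {seq : List Char} {c : Char} {i : Int}
    (h : pvPosL seq c = [i]) : PySem.Chars.findFrom seq [c] (i + 1) none = -1 := by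
  have hmem : i ∈ pvPosL seq c := by rw [h]; simp
  obtain ⟨k, rfl, hk⟩ := pv_mem_posL.mp hmem
  have hklen : k < seq.length := (List.getElem?_eq_some_iff.mp hk).1
  have hcast : ((k : Int) + 1 : Int) = ((k + 1 : Nat) : Int) := by omega
  rw [hcast, PySem.Chars.findFrom_natCast_eq_neg_one_iff seq [c] (k + 1) (by omega)]
  intro hinf
  obtain ⟨j, hj⟩ := (PySem.Chars.exists_prefix_drop_iff_isIn [c] (seq.drop (k + 1))).mpr
    ((PySem.Chars.isIn_iff_infix [c] (seq.drop (k + 1))).mpr hinf)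
  rw [List.drop_drop] at hj
  have : ((k + 1 + j : Nat) : Int) ∈ pvPosL seq c :=
    pv_mem_posL.mpr ⟨k + 1 + j, rfl, pv_prefix_drop.mp hj⟩
  rw [h] at this
  simp at this
  omega

theorem pv_findFrom_second {seq : List Char} {c : Char} {i j : Int} {t : List Int}
    (h : pvPosL seq c = i :: j :: t) : PySem.Chars.findFrom seq [c] (i + 1) none = j := by
  have hmi : i ∈ pvPosL seq c := by rw [h]; simp
  have hmj : j ∈ pvPosL seq c := by rw [h]; simp
  obtain ⟨ki, rfl, hki⟩ := pv_mem_posL.mp hmi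
  obtain ⟨kj, rfl, hkj⟩ := pv_mem_posL.mp hmj
  have hpw := pv_posL_pairwise seq c
  rw [h] at hpw
  have hij : (ki : Int) < (kj : Int) := (List.pairwise_cons.mp hpw).1 _ (by simp)
  have hjt : ∀ x ∈ t, (kj : Int) < x :=
    (List.pairwise_cons.mp (List.pairwise_cons.mp hpw).2).1
  have hkilen : ki < seq.length := (List.getElem?_eq_some_iff.mp hki).1
  have hkjlen : kj < seq.length := (List.getElem?_eq_some_iff.mp hkj).1
  have hcast : ((ki : Int) + 1 : Int) = ((ki + 1 : Nat) : Int) := by omega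
  rw [hcast]
  have hne : PySem.Chars.findFrom seq [c] ((ki + 1 : Nat) : Int) ≠ -1 := by
    intro heq
    rw [PySem.Chars.findFrom_natCast_eq_neg_one_iff seq [c] (ki + 1) (by omega)] at heq
    apply heq
    apply (PySem.Chars.isIn_iff_infix [c] (seq.drop (ki + 1))).mp
    apply (PySem.Chars.exists_prefix_drop_iff_isIn [c] (seq.drop (ki + 1))).mp
    refine ⟨kj - (ki + 1), ?_⟩
    rw [List.drop_drop]
    have heq2 : ki + 1 + (kj - (ki + 1)) = kj := by omega
    rw [heq2]
    exact pv_prefix_drop.mpr hkj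
  obtain ⟨hkr, hrpre, hrmin⟩ :=
    PySem.Chars.findFrom_natCast_spec seq [c] (ki + 1) (by omega) hne
  set r := PySem.Chars.findFrom seq [c] ((ki + 1 : Nat) : Int) with hr
  have hr0 : 0 ≤ r := by
    have : ((ki + 1 : Nat) : Int) ≤ r := hkr
    omega
  have hrk : seq[r.toNat]? = some c := pv_prefix_drop.mp hrpre
  have hrmem : r ∈ pvPosL seq c := pv_mem_posL.mpr ⟨r.toNat, by omega, hrk⟩
  have hrle : r ≤ (kj : Int) := by
    by_contra hlt
    rw [not_le] at hlt
    exact hrmin kj (by omega) (by omega) (pv_prefix_drop.mpr hkj)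
  rw [h] at hrmem
  rcases List.mem_cons.mp hrmem with heq | hrt
  · omega
  · rcases List.mem_cons.mp hrt with heq | hrt'
    · exact heq
    · have := hjt _ hrt'
      omega

theorem pv_span_nil_single {seq : List Char} {c : Char} {i : Int}
    (h : pvPosL seq c = [i]) : pvSpan seq c = [] := by
  have hmem : i ∈ pvPosL seq c := by rw [h]; simp
  obtain ⟨k, rfl, hk⟩ := pv_mem_posL.mp hmem
  unfold pvSpan
  rw [pv_find_eq_head h, pv_findFrom_none h]
  exact PySem.List.pyRange_one_eq_nil (by omega)

theorem pv_span_nil_none {seq : List Char} {c : Char} (h : pvPosL seq c = []) :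
    pvSpan seq c = [] := by
  unfold pvSpan
  rw [pv_find_none h]
  norm_num
  rw [pv_find_none h]
  exact PySem.List.pyRange_one_eq_nil (by omega)

theorem pv_span_two {seq : List Char} {c : Char} {i j : Int} {t : List Int}
    (h : pvPosL seq c = i :: j :: t) : pvSpan seq c = PySem.List.pyRange (i + 1) j 1 := by
  unfold pvSpan
  rw [pv_find_eq_head h, pv_findFrom_second h]

theorem pv_span_facts {seq : List Char} {n : Char} {i : Int} (h : i ∈ pvSpan seq n) :
    0 ≤ i ∧ i < seq.length ∧ PySem.List.pyGetD seq i ' ' ≠ n := by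
  rcases hp : pvPosL seq n with _ | ⟨i0, t0⟩
  · rw [pv_span_nil_none hp] at h
    simp at h
  · rcases t0 with _ | ⟨j0, t⟩
    · rw [pv_span_nil_single hp] at h
      simp at h
    · rw [pv_span_two hp] at h
      obtain ⟨h1, h2⟩ := PySem.List.mem_pyRange_one.mp h
      have hmi : i0 ∈ pvPosL seq n := by rw [hp]; simp
      have hmj : j0 ∈ pvPosL seq n := by rw [hp]; simp
      obtain ⟨ki, rfl, hki⟩ := pv_mem_posL.mp hmi
      obtain ⟨kj, rfl, hkj⟩ := pv_mem_posL.mp hmj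
      have hkjlen : kj < seq.length := (List.getElem?_eq_some_iff.mp hkj).1
      have h0 : 0 ≤ i := by omega
      have hlen : i < seq.length := by omega
      refine ⟨h0, hlen, ?_⟩
      intro hcontra
      rw [PySem.List.pyGetD_eq_getElem seq ' ' h0 hlen] at hcontra
      have hmem : i ∈ pvPosL seq n := by
        refine pv_mem_posL.mpr ⟨i.toNat, by omega, ?_⟩
        rw [List.getElem?_eq_some_iff]
        exact ⟨by omega, hcontra⟩
      rw [hp] at hmem
      have hpw := pv_posL_pairwise seq n
      rw [hp] at hpw
      have hjt : ∀ x ∈ t, ((kj : Int)) < x :=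
        (List.pairwise_cons.mp (List.pairwise_cons.mp hpw).2).1
      rcases List.mem_cons.mp hmem with heq | hmem'
      · omega
      · rcases List.mem_cons.mp hmem' with heq | hmem''
        · omega
        · have := hjt _ hmem''
          omega

theorem pv_loopA_collapse {seq : List Char} {n : Char} {I : List Int}
    (hne : ∀ i ∈ I, PySem.List.pyGetD seq i ' ' ≠ n) :
    ∀ (perm : PySem.Dict Char String) (v : String),
      pvLoopA seq n I (perm.insert n v) = perm.insert n (pvLabAux seq perm n I v) := by
  induction I with
  | nil => intro perm v; simp [pvLoopA, pvLabAux]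
  | cons i rest ih =>
    intro perm v
    have hi : PySem.List.pyGetD seq i ' ' ≠ n := hne i (by simp)
    have hrest : ∀ j ∈ rest, PySem.List.pyGetD seq j ' ' ≠ n := fun j hj => hne j (by simp [hj])
    simp only [pvLoopA]
    rw [PySem.Dict.getD_insert_of_ne perm v "" hi]
    by_cases hlt : pvIntAt seq i < pvIntCh n
    · by_cases hpk : perm.getD (PySem.List.pyGetD seq i ' ') "" = "PK"
      · rw [if_pos hlt, if_pos (by simp [hpk]), PySem.Dict.insert_insert_self]
        have hdec : decide (pvIntAt seq i < pvIntCh n) = true := by simp [hlt]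
        simp [pvLabAux, hdec, hpk]
      · rw [if_pos hlt, if_neg (by simpa using hpk), PySem.Dict.insert_insert_self, ih hrest]
        have hdec : decide (pvIntAt seq i < pvIntCh n) = true := by simp [hlt]
        simp only [pvLabAux, List.filter_cons, hdec, if_true, List.map_cons, List.contains_cons]
        rcases (List.map (fun i => perm.getD (PySem.List.pyGetD seq i ' ') "")
            (List.filter (fun i => decide (pvIntAt seq i < pvIntCh n)) rest)).contains "PK" with _ | _
        · simp
          rcases (List.map (fun i => perm.getD (PySem.List.pyGetD seq i ' ') "")
              (List.filter (fun i => decide (pvIntAt seq i < pvIntCh n)) rest)).isEmpty with _ | _ <;>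
            simp [Ne.symm hpk]
        · simp
    · rw [if_neg hlt, ih hrest]
      have hdec : decide (pvIntAt seq i < pvIntCh n) = false := by simp [hlt]
      simp only [pvLabAux, List.filter_cons, hdec, Bool.false_eq_true, if_false]

theorem pv_permStep_eq (seq : List Char) (perm : PySem.Dict Char String) (n : Char) :
    pvPermStep seq perm n =
      if perm.contains n then perm else perm.insert n (pvLabD seq perm n) := by
  by_cases hc : perm.contains n
  · simp [pvPermStep, hc]
  · simp only [pvPermStep, hc, Bool.false_eq_true, if_false]
    show pvLoopA seq n (pvSpan seq n) (perm.insert n "H") = perm.insert n (pvLabD seq perm n)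
    rw [pv_loopA_collapse (fun i hi => (pv_span_facts hi).2.2)]
    rfl

theorem pv_trip_labD (seq : List Char) (perm : PySem.Dict Char String) (n : Char) :
    pvTrip (pvLabD seq perm n) := by
  simp only [pvLabD, pvLabAux]
  split_ifs <;> simp [pvTrip]

theorem pv_contains_foldl (seq : List Char) (xs : List Char) (d : PySem.Dict Char String)
    (c : Char) : (xs.foldl (pvPermStep seq) d).contains c = (d.contains c || xs.contains c) := by
  induction xs generalizing d with
  | nil => simp
  | cons x xs ih =>
    simp only [List.foldl_cons, ih, pv_permStep_eq, List.contains_cons]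
    by_cases hcx : c = x
    · subst hcx
      by_cases h : d.contains c
      · simp [h]
      · simp [h]
    · have hbx : (c == x) = false := by simp [hcx]
      by_cases h : d.contains x
      · simp [h, hbx]
      · simp [h, PySem.Dict.contains_insert, hbx]

theorem pv_trip_foldl (seq : List Char) (xs : List Char) (d : PySem.Dict Char String)
    (hd : ∀ c v, d.get? c = some v → pvTrip v) :
    ∀ c v, (xs.foldl (pvPermStep seq) d).get? c = some v → pvTrip v := by
  induction xs generalizing d with
  | nil => simpa using hd
  | cons x xs ih =>
    simp only [List.foldl_cons, pv_permStep_eq]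
    by_cases hx : d.contains x
    · simp only [hx, if_true]; exact ih d hd
    · simp only [hx, Bool.false_eq_true, if_false]
      apply ih
      intro c v hget
      by_cases hcx : c = x
      · subst hcx
        rw [PySem.Dict.get?_insert_self] at hget
        cases hget
        exact pv_trip_labD seq d _
      · rw [PySem.Dict.get?_insert_of_ne _ _ hcx] at hget
        exact hd c v hget

theorem pv_intAt_eq {seq : List Char} {i : Int} (h0 : 0 ≤ i) (h1 : i < seq.length) :
    pvIntAt seq i = pvIntCh (PySem.List.pyGetD seq i ' ') := by
  unfold pvIntAt pvIntCh
  have hk : i.toNat < seq.length := by omega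
  rw [PySem.List.slice_toNat seq h0 (by omega), PySem.List.pyGetD_eq_getElem seq ' ' h0 (by exact_mod_cast h1)]
  have h2 : (i + 1).toNat - i.toNat = 1 := by omega
  rw [h2, List.drop_eq_getElem_cons hk]
  rfl

theorem pv_emitStep_eq (perm : PySem.Dict Char String) (st : List (List Char) × List Char)
    (n : Char) :
    pvEmitStep perm st n =
      if st.2.contains n then (st.1 ++ [pvCloseC (perm.getD n "")], st.2)
      else (st.1 ++ [pvOpenC (perm.getD n "")], st.2 ++ [n]) := by
  unfold pvEmitStep pvOpenC pvCloseC
  cases h1 : (perm.getD n "" == "H") <;> cases h2 : (perm.getD n "" == "PK") <;>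
    cases h3 : st.2.contains n <;> simp_all

-- ===== B-side lemmas =====

theorem pv_occ_swap (seq : List Char) :
    pvOccB seq = ((PySem.List.enumerate seq 0).map (fun p => (p.2, p.1))).foldl
      (fun occ p => occ.modify p.1 [] (· ++ [p.2])) PySem.Dict.empty :=
  (List.foldl_map (g := fun (occ : PySem.Dict Char (List Int)) (p : Char × Int) => occ.modify p.1 [] (· ++ [p.2])) (f := fun p : Int × Char => (p.2, p.1)) (l := PySem.List.enumerate seq 0) (init := PySem.Dict.empty)).symm

theorem pv_occ_getD (seq : List Char) (c : Char) :
    (pvOccB seq).getD c [] = pvPosL seq c := by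
  rw [pv_occ_swap, PySem.Dict.getD_foldl_modify_append]
  unfold pvPosL
  rw [List.filter_map, List.map_map]
  rfl

theorem pv_occ_keys (seq : List Char) : (pvOccB seq).keys = PySem.List.dedup seq := by
  rw [pv_occ_swap]
  rw [show (fun (occ : PySem.Dict Char (List Int)) (p : Char × Int) => occ.modify p.1 [] (· ++ [p.2]))
      = (fun occ p => occ.modify ((fun (q : Char × Int) => q.1) p) [] ((fun (_ : PySem.Dict Char (List Int)) (q : Char × Int) => (· ++ [q.2])) occ p)) from rfl]
  rw [PySem.Dict.keys_foldl_modify_key]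
  simp only [PySem.Dict.keys_empty, List.map_map]
  rw [show ((fun (q : Char × Int) => q.1) ∘ fun p : Int × Char => (p.2, p.1)) = (fun p : Int × Char => p.2) from rfl]
  rw [PySem.List.map_snd_enumerate]
  rfl

theorem pv_occ_nodup (seq : List Char) : (pvOccB seq).keys.Nodup := by
  rw [pv_occ_keys]; exact PySem.List.nodup_dedup seq

theorem pv_occ_items (seq : List Char) :
    (pvOccB seq).items = (PySem.List.dedup seq).map (fun c => (c, pvPosL seq c)) := by
  rw [PySem.Dict.items_eq_map_keys _ (pv_occ_nodup seq) ([] : List Int), pv_occ_keys]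
  exact List.map_congr_left (fun c _ => by rw [pv_occ_getD])

-- distinct new symbols of post not in seen, in order
def pvNew (seen : List Char) : List Char → List Char
  | [] => []
  | c :: post => if seen.contains c then pvNew seen post else c :: pvNew (seen ++ [c]) post

theorem pv_foldl_add_eq (post : List Char) : ∀ seen : List Char,
    post.foldl PySem.Set.add seen = seen ++ pvNew seen post := by
  induction post with
  | nil => intro seen; simp [pvNew]
  | cons c post ih =>
    intro seen
    simp only [List.foldl_cons, pvNew, PySem.Set.add, PySem.Set.contains]
    by_cases h : seen.contains c
    · simp only [h, if_true]; exact ih seen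
    · simp only [h, Bool.false_eq_true, if_false]
      rw [ih (seen ++ [c]), List.append_assoc]
      rfl

theorem pv_dedup_eq_new (seq : List Char) : PySem.List.dedup seq = pvNew [] seq := by
  rw [PySem.List.dedup_eq_ofList, PySem.Set.ofList_eq_foldl]
  exact pv_foldl_add_eq seq []

theorem pv_new_congr (post : List Char) : ∀ seen seen' : List Char,
    (∀ x, seen.contains x = seen'.contains x) → pvNew seen post = pvNew seen' post := by
  induction post with
  | nil => intros; rfl
  | cons c post ih =>
    intro seen seen' h
    simp only [pvNew, h c]
    by_cases hc : seen'.contains c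
    · simp only [hc, if_true]; exact ih _ _ h
    · simp only [hc, Bool.false_eq_true, if_false]
      have : ∀ x, (seen ++ [c]).contains x = (seen' ++ [c]).contains x := by
        intro x
        simp [List.contains_eq_mem, h x]
        rw [← Bool.decide_or, ← Bool.decide_or]
        simp [List.contains_eq_mem] at h
        simp [h x]
      rw [ih _ _ this]

theorem pv_mem_new {post : List Char} : ∀ {seen : List Char} {x : Char},
    x ∈ pvNew seen post ↔ x ∈ post ∧ x ∉ seen := by
  induction post with
  | nil => simp [pvNew]
  | cons c post ih =>
    intro seen x
    simp only [pvNew]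
    by_cases h : c ∈ seen
    · rw [if_pos (by simp [List.contains_eq_mem, h]), ih]
      constructor
      · rintro ⟨h1, h2⟩; exact ⟨by simp [h1], h2⟩
      · rintro ⟨h1, h2⟩
        rcases List.mem_cons.mp h1 with rfl | h1
        · exact absurd h h2
        · exact ⟨h1, h2⟩
    · rw [if_neg (by simp [List.contains_eq_mem, h])]
      simp only [List.mem_cons, ih, List.mem_append, List.mem_singleton]
      constructor
      · rintro (rfl | ⟨h1, h2⟩)
        · exact ⟨Or.inl rfl, h⟩
        · exact ⟨Or.inr h1, fun hx => h2 (Or.inl hx)⟩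
      · rintro ⟨rfl | h1, h2⟩
        · exact Or.inl rfl
        · by_cases hxc : x = c
          · exact Or.inl hxc
          · exact Or.inr ⟨h1, by tauto⟩

theorem pv_nodup_new {post : List Char} : ∀ {seen : List Char},
    (pvNew seen post).Nodup := by
  induction post with
  | nil => simp [pvNew]
  | cons c post ih =>
    intro seen
    simp only [pvNew]
    by_cases h : seen.contains c
    · rw [if_pos h]; exact ih
    · rw [if_neg (by rw [List.contains_eq_mem] at h; simpa using h)]
      refine List.nodup_cons.mpr ⟨?_, ih⟩
      intro hmem
      have h2 := (pv_mem_new.mp hmem).2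
      rw [List.contains_eq_mem] at h
      exact h (by simpa using h2)


-- ===== classification: B's distinct-symbol pass equals A's phase 1 =====

theorem pv_P1_snoc (seq pre : List Char) (c : Char) :
    pvP1 seq (pre ++ [c]) = pvPermStep seq (pvP1 seq pre) c := by
  rw [pvP1, pvP1, List.foldl_append]
  rfl

theorem pv_posL_split {seq pre post : List Char} {c : Char} (hseq : seq = pre ++ c :: post)
    (hc : c ∉ pre) : ∃ t, pvPosL seq c = ((pre.length : Int)) :: t := by
  have hmem : ((pre.length : Int)) ∈ pvPosL seq c := by
    refine pv_mem_posL.mpr ⟨pre.length, rfl, ?_⟩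
    subst hseq
    rw [List.getElem?_append_right (le_refl pre.length)]
    simp
  rcases hp : pvPosL seq c with _ | ⟨h0, t⟩
  · rw [hp] at hmem; simp at hmem
  · rw [hp] at hmem
    have hpw := pv_posL_pairwise seq c
    rw [hp] at hpw
    have hh0 : h0 ∈ pvPosL seq c := by rw [hp]; simp
    obtain ⟨k, hkeq, hk⟩ := pv_mem_posL.mp hh0
    rcases List.mem_cons.mp hmem with heq | hmemt
    · refine ⟨t, ?_⟩
      rw [← heq]
    · exfalso
      have hlt : (k : Int) < pre.length := by
        have := (List.pairwise_cons.mp hpw).1 _ hmemt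
        omega
      apply hc
      subst hseq
      have hk' : k < pre.length := by exact_mod_cast hlt
      rw [List.getElem?_append_left hk'] at hk
      exact List.mem_of_getElem? hk

theorem pv_take_contains {seq : List Char} {c : Char} {k : Nat} :
    (seq.take k).contains c = true ↔ ∃ j ∈ pvPosL seq c, j < (k : Int) := by
  rw [List.contains_eq_mem, decide_eq_true_iff]
  constructor
  · intro h
    obtain ⟨r, hr, helem⟩ := List.mem_iff_getElem.mp h
    rw [List.getElem_take] at helem
    have hrlen : r < seq.length := by
      have := hr; rw [List.length_take] at this; omega
    refine ⟨(r : Int), pv_mem_posL.mpr ⟨r, rfl, ?_⟩, ?_⟩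
    · rw [List.getElem?_eq_some_iff]; exact ⟨hrlen, helem⟩
    · have : r < k := by rw [List.length_take] at hr; omega
      exact_mod_cast this
  · rintro ⟨j, hj, hjk⟩
    obtain ⟨r, rfl, hr⟩ := pv_mem_posL.mp hj
    obtain ⟨hrlen, helem⟩ := List.getElem?_eq_some_iff.mp hr
    have hrk : r < k := by exact_mod_cast hjk
    apply List.mem_iff_getElem.mpr
    refine ⟨r, by rw [List.length_take]; omega, ?_⟩
    rw [List.getElem_take]; exact helem

-- the Pre_ clause, extracted: a smaller inner symbol of c's first span was seen before c
theorem pv_prex {seq pre post : List Char} {c : Char} {j i : Int} {t : List Int}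
    (hP : pvPreStr seq = true) (hseq : seq = pre ++ c :: post) (hc : c ∉ pre)
    (hp : pvPosL seq c = ((pre.length : Int)) :: j :: t)
    (hi : i ∈ PySem.List.pyRange ((pre.length : Int) + 1) j 1)
    (hlt : pvIntAt seq i < pvIntCh c) :
    PySem.List.pyGetD seq i ' ' ∈ pre := by
  have hspan : pvSpan seq c = PySem.List.pyRange ((pre.length : Int) + 1) j 1 := pv_span_two hp
  have hif : i ∈ pvSpan seq c := by rw [hspan]; exact hi
  obtain ⟨hi0, hilen, _⟩ := pv_span_facts hif
  obtain ⟨hia, hij⟩ := PySem.List.mem_pyRange_one.mp hi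
  have hmj : j ∈ pvPosL seq c := by rw [hp]; simp
  obtain ⟨kj, rfl, hkj⟩ := pv_mem_posL.mp hmj
  obtain ⟨hkjlen, hkjel⟩ := List.getElem?_eq_some_iff.mp hkj
  have halen : pre.length < seq.length := by
    subst hseq; simp
  have haq : seq[pre.length]? = some c := by
    subst hseq
    rw [List.getElem?_append_right (le_refl pre.length)]
    simp
  have hgda : seq.getD pre.length ' ' = c := by
    rw [List.getD_eq_getElem?_getD, haq]; rfl
  have hgdq : seq.getD kj ' ' = c := by
    rw [List.getD_eq_getElem?_getD, hkj]; rfl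
  have hgdi : seq.getD i.toNat ' ' = PySem.List.pyGetD seq i ' ' := by
    rw [PySem.List.pyGetD_eq_getElem seq ' ' hi0 (by exact_mod_cast hilen),
      List.getD_eq_getElem _ _ (by omega)]
  -- instantiate the Pre_ formula at p = pre.length, q = kj, i = i.toNat
  simp only [pvPreStr, List.all_eq_true, List.mem_range] at hP
  have hkey := hP pre.length (by omega) kj hkjlen i.toNat (by omega)
  have g1 : decide (pre.length < i.toNat) = true := by
    simp only [decide_eq_true_iff]; omega
  have g2 : decide (i.toNat < kj) = true := by
    simp only [decide_eq_true_iff]; omega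
  have g3 : (seq.getD pre.length ' ' == seq.getD kj ' ') = true := by
    rw [hgda, hgdq]; simp
  have g4 : (seq.take pre.length).contains (seq.getD pre.length ' ') = false := by
    rw [hgda]
    subst hseq
    rw [List.take_left, List.contains_eq_mem]
    simpa using hc
  have g5 : ((seq.drop (pre.length + 1)).take (kj - (pre.length + 1))).contains
      (seq.getD pre.length ' ') = false := by
    rw [hgda]
    by_contra hcon
    rw [Bool.not_eq_false, List.contains_eq_mem, decide_eq_true_iff] at hcon
    obtain ⟨r, hr, helem⟩ := List.mem_iff_getElem.mp hcon
    rw [List.getElem_take, List.getElem_drop] at helem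
    have hrb : r < kj - (pre.length + 1) := by
      rw [List.length_take] at hr; omega
    have hidx : ((pre.length + 1 + r : Nat) : Int) ∈ pvSpan seq c := by
      rw [hspan]
      refine PySem.List.mem_pyRange_one.mpr ⟨by push_cast; omega, by push_cast; omega⟩
    have hne := (pv_span_facts hidx).2.2
    apply hne
    have hlen2 : pre.length + 1 + r < seq.length := by omega
    rw [PySem.List.pyGetD_eq_getElem seq ' ' (by positivity) (by exact_mod_cast hlen2)]
    simpa using helem
  have hxd : decide (pvIntCh (seq.getD i.toNat ' ') < pvIntCh (seq.getD pre.length ' ')) = true := by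
    rw [hgda, hgdi]
    simp only [decide_eq_true_iff]
    rw [← pv_intAt_eq hi0 (by exact_mod_cast hilen)]
    exact hlt
  rw [g1, g2, g3, g4, g5, hxd] at hkey
  simp only [Bool.and_true, Bool.true_and, Bool.not_true, Bool.not_false, Bool.and_false,
    Bool.false_and, Bool.false_or, Bool.or_false, Bool.and_eq_true] at hkey
  have hseen : (seq.take pre.length).contains (seq.getD i.toNat ' ') = true := by tauto
  rw [hgdi] at hseen
  subst hseq
  rw [List.take_left, List.contains_eq_mem, decide_eq_true_iff] at hseen
  exact hseen

-- B classifies c (at its first occurrence) exactly as A's phase-1 step does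
theorem pv_cls_crux {seq pre post : List Char} {c : Char} (d : PySem.Dict Char String)
    (hP : pvPreStr seq = true) (hseq : seq = pre ++ c :: post) (hc : c ∉ pre)
    (hdk : ∀ m, d.contains m = pre.contains m) :
    pvClsStep (pvOccB seq) d (c, pvPosL seq c) = d.insert c (pvLabD seq d c) := by
  obtain ⟨t, hp⟩ := pv_posL_split hseq hc
  simp only [pvClsStep]
  congr 1
  rcases t with _ | ⟨j, t'⟩
  · -- single occurrence: no span
    rw [hp]
    rw [if_neg (by simp)]
    rw [pvLabD, pv_span_nil_single hp]
    simp [pvLabAux]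
  · rw [hp]
    have hg0 : PySem.List.pyGetD ((pre.length : Int) :: j :: t') 0 0 = (pre.length : Int) := by
      simp [pysem]
    have hg1 : PySem.List.pyGetD ((pre.length : Int) :: j :: t') 1 0 = j := by
      simp [pysem]
    have hspan : pvSpan seq c = PySem.List.pyRange ((pre.length : Int) + 1) j 1 := pv_span_two hp
    by_cases hj : 1 < j - (pre.length : Int)
    · rw [if_pos (by rw [hg0, hg1]; exact ⟨by simp, hj⟩)]
      rw [hg0, hg1]
      -- membership equivalence of the two label lists
      have memeq : ∀ x : String,
          x ∈ ((d.keys.filter (fun m =>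
              (((pvOccB seq).getD m []).any (fun p =>
                decide ((pre.length : Int) < p) && decide (p < j))) &&
              decide (pvIntCh m < pvIntCh c))).map (fun m => d.getD m "")) ↔
          x ∈ (((PySem.List.pyRange ((pre.length : Int) + 1) j 1).filter
              (fun i => pvIntAt seq i < pvIntCh c)).map
              (fun i => d.getD (PySem.List.pyGetD seq i ' ') "")) := by
        intro x
        simp only [List.mem_map, List.mem_filter, pv_occ_getD, List.any_eq_true,
          Bool.and_eq_true, decide_eq_true_iff]
        constructor
        · rintro ⟨m, ⟨hmk, ⟨p, hpm, hpa, hpj⟩, hmv⟩, rfl⟩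
          obtain ⟨k, rfl, hk⟩ := pv_mem_posL.mp hpm
          obtain ⟨hklen, hkel⟩ := List.getElem?_eq_some_iff.mp hk
          have hmget : PySem.List.pyGetD seq (k : Int) ' ' = m := by
            rw [PySem.List.pyGetD_eq_getElem seq ' ' (by positivity) (by exact_mod_cast hklen)]
            simpa using hkel
          refine ⟨(k : Int), ⟨PySem.List.mem_pyRange_one.mpr ⟨by omega, hpj⟩, ?_⟩, ?_⟩
          · rw [pv_intAt_eq (by positivity) (by exact_mod_cast hklen), hmget]
            exact hmv
          · rw [hmget]
        · rintro ⟨i, ⟨hir, hif⟩, rfl⟩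
          have hifs : i ∈ pvSpan seq c := by rw [hspan]; exact hir
          obtain ⟨hi0, hilen, _⟩ := pv_span_facts hifs
          obtain ⟨hia, hij⟩ := PySem.List.mem_pyRange_one.mp hir
          have hmpre : PySem.List.pyGetD seq i ' ' ∈ pre := pv_prex hP hseq hc hp hir hif
          refine ⟨PySem.List.pyGetD seq i ' ', ⟨?_, ⟨i, ?_, by omega, hij⟩, ?_⟩, rfl⟩
          · rw [← PySem.Dict.contains_iff_mem_keys, hdk, List.contains_eq_mem]
            simpa using hmpre
          · refine pv_mem_posL.mpr ⟨i.toNat, by omega, ?_⟩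
            rw [List.getElem?_eq_some_iff]
            refine ⟨by omega, ?_⟩
            rw [PySem.List.pyGetD_eq_getElem seq ' ' hi0 (by exact_mod_cast hilen)]
          · rw [← pv_intAt_eq hi0 (by exact_mod_cast hilen)]
            exact hif
      have c1 : ∀ L1 L2 : List String, (∀ x, x ∈ L1 ↔ x ∈ L2) →
          ((PySem.Set.ofList L1).contains "PK" = L2.contains "PK" ∧
           (PySem.Set.ofList L1).isEmpty = L2.isEmpty) := by
        intro L1 L2 hmem
        constructor
        · simp only [PySem.Set.contains, List.contains_eq_mem]
          rw [decide_eq_decide]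
          rw [PySem.Set.mem_ofList]
          exact hmem "PK"
        · rcases hL2 : L2.isEmpty with _ | _
          · rw [List.isEmpty_eq_false_iff_exists_mem] at hL2
            obtain ⟨x, hx⟩ := hL2
            rw [List.isEmpty_eq_false_iff_exists_mem]
            exact ⟨x, (PySem.Set.mem_ofList _ _).mpr ((hmem x).mpr hx)⟩
          · rw [List.isEmpty_iff] at hL2
            rw [List.isEmpty_iff, List.eq_nil_iff_forall_not_mem]
            intro x hx
            have := (hmem x).mp ((PySem.Set.mem_ofList _ _).mp hx)
            rw [hL2] at this
            simp at this
      obtain ⟨e1, e2⟩ := c1 _ _ (memeq)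
      rw [e1, e2, pvLabD, hspan]
      simp only [pvLabAux]
    · rw [if_neg (by rw [hg0, hg1]; rintro ⟨-, h2⟩; omega)]
      rw [pvLabD, hspan, PySem.List.pyRange_one_eq_nil (by omega)]
      simp [pvLabAux]

-- the induction: folding B's classifier over the still-unseen symbols extends A's phase-1 dict
theorem pv_cls_ind (seq : List Char) (hP : pvPreStr seq = true) :
    ∀ (post pre : List Char), seq = pre ++ post →
      ((pvNew pre post).map (fun c => (c, pvPosL seq c))).foldl
        (pvClsStep (pvOccB seq)) (pvP1 seq pre) = pvP1 seq (pre ++ post) := by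
  intro post
  induction post with
  | nil => intro pre h; simp [pvNew]
  | cons c post ih =>
    intro pre hseq
    have hP1c : (pvP1 seq pre).contains c = pre.contains c := by
      rw [pvP1, pv_contains_foldl]
      simp
    by_cases hcp : c ∈ pre
    · have hcc : pre.contains c = true := by rw [List.contains_eq_mem]; simpa using hcp
      simp only [pvNew, hcc, if_true]
      have hskip : pvP1 seq (pre ++ [c]) = pvP1 seq pre := by
        rw [pv_P1_snoc, pv_permStep_eq, hP1c, hcc]
        simp
      have hcong : pvNew pre post = pvNew (pre ++ [c]) post := by
        apply pv_new_congr
        intro x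
        simp only [List.contains_eq_mem]
        rw [decide_eq_decide]
        simp only [List.mem_append, List.mem_singleton]
        constructor
        · exact Or.inl
        · rintro (h | rfl)
          · exact h
          · exact hcp
      rw [hcong, ← hskip]
      rw [ih (pre ++ [c]) (by rw [hseq, List.append_assoc]; rfl)]
      rw [List.append_assoc]
      rfl
    · have hcc : pre.contains c = false := by
        rw [List.contains_eq_mem]; simpa using hcp
      simp only [pvNew, hcc, Bool.false_eq_true, if_false, List.map_cons, List.foldl_cons]
      have hstep : pvClsStep (pvOccB seq) (pvP1 seq pre) (c, pvPosL seq c) =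
          pvP1 seq (pre ++ [c]) := by
        rw [pv_cls_crux (pvP1 seq pre) hP hseq hcp (fun m => by
          rw [pvP1, pv_contains_foldl]; simp)]
        rw [pv_P1_snoc, pv_permStep_eq, hP1c, hcc]
        simp
      rw [hstep]
      rw [ih (pre ++ [c]) (by rw [hseq, List.append_assoc]; rfl)]
      rw [List.append_assoc]
      rfl

-- B's label dict IS A's perm dict
theorem pv_cls_main (seq : List Char) (hP : pvPreStr seq = true) :
    (pvOccB seq).items.foldl (pvClsStep (pvOccB seq)) PySem.Dict.empty = pvP1 seq seq := by
  rw [pv_occ_items, pv_dedup_eq_new]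
  have := pv_cls_ind seq hP seq [] (by simp)
  simpa [pvP1] using this



-- ===== emission: A's second pass and B's painting produce the same cell list =====

-- the bracket cell emitted at each position, as a sequential recursion (A's pass-2 shape)
def pvCells (P : PySem.Dict Char String) : List Char → List Char → List (List Char)
  | _, [] => []
  | seen, n :: rest =>
    if seen.contains n then pvCloseC (P.getD n "") :: pvCells P seen rest
    else pvOpenC (P.getD n "") :: pvCells P (seen ++ [n]) rest

theorem pv_emit_cells (P : PySem.Dict Char String) :
    ∀ (post : List Char) (DB : List (List Char)) (taken : List Char),
      (post.foldl (pvEmitStep P) (DB, taken)).1 = DB ++ pvCells P taken post := by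
  intro post
  induction post with
  | nil => intro DB taken; simp [pvCells]
  | cons n post ih =>
    intro DB taken
    rw [List.foldl_cons, pv_emitStep_eq]
    by_cases h : taken.contains n
    · have hc : pvCells P taken (n :: post)
          = pvCloseC (P.getD n "") :: pvCells P taken post := by
        simp only [pvCells]
        rw [if_pos h]
      rw [if_pos h, ih, hc]
      simp
    · have hc : pvCells P taken (n :: post)
          = pvOpenC (P.getD n "") :: pvCells P (taken ++ [n]) post := by
        simp only [pvCells]
        rw [if_neg h]
      rw [if_neg (by rw [List.contains_eq_mem] at h; simpa using h), ih, hc]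
      simp

theorem pv_cells_getElem? (P : PySem.Dict Char String) :
    ∀ (post seen : List Char) (k : Nat),
      (pvCells P seen post)[k]? = post[k]?.map (fun n =>
        if n ∈ seen ++ post.take k then pvCloseC (P.getD n "")
        else pvOpenC (P.getD n "")) := by
  intro post
  induction post with
  | nil => intro seen k; simp [pvCells]
  | cons c post ih =>
    intro seen k
    cases k with
    | zero =>
      simp only [pvCells]
      by_cases h : c ∈ seen
      · rw [if_pos (by rw [List.contains_eq_mem]; simpa using h)]
        simp [h]
      · rw [if_neg (by rw [List.contains_eq_mem]; simpa using h)]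
        simp [h]
    | succ k =>
      simp only [pvCells]
      by_cases h : c ∈ seen
      · rw [if_pos (by rw [List.contains_eq_mem]; simpa using h)]
        simp only [List.getElem?_cons_succ, List.take_succ_cons, ih]
        cases hpk : post[k]? with
        | none => rfl
        | some n =>
          simp only [Option.map_some]
          exact congrArg some (if_congr (by
            simp only [List.mem_append, List.mem_cons]
            constructor
            · tauto
            · rintro (h1 | rfl | h1) <;> tauto) rfl rfl)
      · rw [if_neg (by rw [List.contains_eq_mem]; simpa using h)]
        simp only [List.getElem?_cons_succ, List.take_succ_cons, ih]
        cases hpk : post[k]? with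
        | none => rfl
        | some n =>
          simp only [Option.map_some]
          exact congrArg some (if_congr (by
            simp only [List.mem_append, List.mem_cons, List.mem_singleton]
            tauto) rfl rfl)

-- the inner 'for p in ps[1:]' loop of B's painter, pointwise
theorem pv_setfold_getElem? (v : List Char) :
    ∀ (qs : List Int) (ch : List (List Char)),
      (∀ q ∈ qs, ∃ kq : Nat, q = (kq : Int) ∧ kq < ch.length) → ∀ k : Nat,
      ((qs.foldl (fun ch p => PySem.List.pySetD ch p v) ch))[k]? =
        if (k : Int) ∈ qs then some v else ch[k]? := by
  intro qs
  induction qs with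
  | nil => intro ch _ k; simp
  | cons q qs ih =>
    intro ch hq k
    obtain ⟨kq, rfl, hkq⟩ := hq q (by simp)
    rw [List.foldl_cons]
    have hlen : (PySem.List.pySetD ch (kq : Int) v).length = ch.length :=
      PySem.List.length_pySetD ..
    rw [ih _ (fun p hp => by
      obtain ⟨kp, hkp, hkpl⟩ := hq p (by simp [hp])
      exact ⟨kp, hkp, by rw [hlen]; exact hkpl⟩) k]
    by_cases hmem : (k : Int) ∈ qs
    · rw [if_pos hmem, if_pos (by simp [hmem])]
    · rw [if_neg hmem]
      rw [PySem.List.pySetD_natCast]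
      by_cases hk : k = kq
      · subst hk
        rw [if_pos (show (k : Int) ∈ (k : Int) :: qs from by simp)]
        exact List.getElem?_set_self hkq
      · rw [if_neg (by
          simp only [List.mem_cons]
          rintro (hc | hc)
          · exact hk (by exact_mod_cast hc)
          · exact hmem hc)]
        rw [List.getElem?_set_ne (by omega)]

theorem pv_setfold_len (v : List Char) (qs : List Int) (ch : List (List Char)) :
    (qs.foldl (fun ch p => PySem.List.pySetD ch p v) ch).length = ch.length := by
  induction qs generalizing ch with
  | nil => rfl
  | cons q qs ih => rw [List.foldl_cons, ih, PySem.List.length_pySetD]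

theorem pv_paint_len (P : PySem.Dict Char String) (ch : List (List Char))
    (item : Char × List Int) : (pvPaintStep P ch item).length = ch.length := by
  simp only [pvPaintStep]
  rw [pv_setfold_len, PySem.List.length_pySetD]

-- one painting step, pointwise
theorem pv_paint_step_getElem? (P : PySem.Dict Char String) (seq : List Char) (c : Char)
    (ch : List (List Char)) (hlen : ch.length = seq.length) (hcm : c ∈ seq) (k : Nat) :
    (pvPaintStep P ch (c, pvPosL seq c))[k]? =
      if (k : Int) ∈ pvPosL seq c then
        (if c ∈ seq.take k
          then some [PySem.List.pyGetD (pvBRACKETS.getD (P.getD c "") []) 1 ' ']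
          else some [PySem.List.pyGetD (pvBRACKETS.getD (P.getD c "") []) 0 ' '])
      else ch[k]? := by
  rcases hp : pvPosL seq c with _ | ⟨h, t⟩
  · exact absurd hcm (pv_posL_nil_iff.mp hp)
  · have hpw := pv_posL_pairwise seq c
    rw [hp] at hpw
    have hrange : ∀ q ∈ h :: t, ∃ kq : Nat, q = (kq : Int) ∧ kq < seq.length := by
      intro q hq
      have : q ∈ pvPosL seq c := by rw [hp]; exact hq
      obtain ⟨kq, rfl, hkq⟩ := pv_mem_posL.mp this
      exact ⟨kq, rfl, (List.getElem?_eq_some_iff.mp hkq).1⟩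
    obtain ⟨kh, hheq, hkh⟩ := hrange h (by simp)
    simp only [pvPaintStep, hp]
    rw [show PySem.List.slice (h :: t) (some 1) none = t from by
      rw [PySem.List.slice_from_one]; rfl]
    rw [show PySem.List.pyGetD (h :: t) 0 0 = h from by simp [pysem]]
    have hlen1 : (PySem.List.pySetD ch h
        [PySem.List.pyGetD (pvBRACKETS.getD (P.getD c "") []) 0 ' ']).length = ch.length :=
      PySem.List.length_pySetD ..
    rw [pv_setfold_getElem? _ t _ (fun q hq => by
      obtain ⟨kq, hkq, hkql⟩ := hrange q (by simp [hq])
      exact ⟨kq, hkq, by rw [hlen1, hlen]; exact hkql⟩) k]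
    by_cases hmt : (k : Int) ∈ t
    · rw [if_pos hmt]
      rw [if_pos (show (k : Int) ∈ h :: t by simp [hmt])]
      have hhk : h < (k : Int) := (List.pairwise_cons.mp hpw).1 _ hmt
      have htc : c ∈ seq.take k := by
        have h1 : (seq.take k).contains c = true :=
          pv_take_contains.mpr ⟨h, by rw [hp]; simp, hhk⟩
        rw [List.contains_eq_mem] at h1
        simpa using h1
      rw [if_pos htc]
    · rw [if_neg hmt]
      subst hheq
      rw [PySem.List.pySetD_natCast]
      by_cases hk : k = kh
      · subst hk
        rw [List.getElem?_set_self (by rw [hlen]; exact hkh)]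
        rw [if_pos (show (k : Int) ∈ (k : Int) :: t by simp)]
        have htc : c ∉ seq.take k := by
          intro hcon
          obtain ⟨j, hj, hjk⟩ := pv_take_contains.mp
            (by rw [List.contains_eq_mem]; simpa using hcon)
          rw [hp] at hj
          rcases List.mem_cons.mp hj with rfl | hjt
          · omega
          · have := (List.pairwise_cons.mp hpw).1 _ hjt
            omega
        rw [if_neg htc]
      · rw [List.getElem?_set_ne (by omega)]
        rw [if_neg (by
          simp only [List.mem_cons]
          rintro (hc | hc)
          · exact hk (by exact_mod_cast hc)
          · exact hmt hc)]

-- the whole painting loop, pointwise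
theorem pv_paint_getElem? (P : PySem.Dict Char String) (seq : List Char) :
    ∀ (cs : List Char) (ch : List (List Char)), cs.Nodup → (∀ c ∈ cs, c ∈ seq) →
      ch.length = seq.length → ∀ (k : Nat) (n : Char), seq[k]? = some n →
      ((cs.map (fun c => (c, pvPosL seq c))).foldl (pvPaintStep P) ch)[k]? =
        if n ∈ cs then
          (if n ∈ seq.take k
            then some [PySem.List.pyGetD (pvBRACKETS.getD (P.getD n "") []) 1 ' ']
            else some [PySem.List.pyGetD (pvBRACKETS.getD (P.getD n "") []) 0 ' '])
        else ch[k]? := by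
  intro cs
  induction cs with
  | nil => intro ch _ _ _ k n _; simp
  | cons c cs ih =>
    intro ch hnd hsub hlen k n hkn
    rw [List.map_cons, List.foldl_cons]
    have hlen' : (pvPaintStep P ch (c, pvPosL seq c)).length = seq.length := by
      rw [pv_paint_len, hlen]
    rw [ih _ (List.nodup_cons.mp hnd).2 (fun x hx => hsub x (by simp [hx])) hlen' k n hkn]
    have hkp : ((k : Int) ∈ pvPosL seq c) ↔ n = c := by
      constructor
      · intro hm
        obtain ⟨k', hk', hsome⟩ := pv_mem_posL.mp hm
        have : k' = k := by exact_mod_cast hk'.symm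
        subst this
        rw [hkn] at hsome
        exact Option.some_inj.mp hsome
      · rintro rfl
        exact pv_mem_posL.mpr ⟨k, rfl, hkn⟩
    have hstep := pv_paint_step_getElem? P seq c ch hlen (hsub c (by simp)) k
    by_cases hnc : n = c
    · subst hnc
      rw [if_neg (List.nodup_cons.mp hnd).1, hstep, if_pos (hkp.mpr rfl)]
      rw [if_pos (show n ∈ n :: cs from List.mem_cons_self)]
    · by_cases hncs : n ∈ cs
      · rw [if_pos hncs, if_pos (show n ∈ c :: cs from by simp [hncs])]
      · rw [if_neg hncs, if_neg (show ¬ n ∈ c :: cs from by simp [hnc, hncs])]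
        rw [hstep, if_neg (fun hm => hnc (hkp.mp hm))]


-- ===== assembly =====

theorem pv_paintfold_len (P : PySem.Dict Char String) :
    ∀ (L : List (Char × List Int)) (ch : List (List Char)),
      (L.foldl (pvPaintStep P) ch).length = ch.length := by
  intro L
  induction L with
  | nil => intro ch; rfl
  | cons x L ih => intro ch; rw [List.foldl_cons, ih, pv_paint_len]

theorem pv_bracket_open {v : String} (h : pvTrip v) :
    [PySem.List.pyGetD (pvBRACKETS.getD v []) 0 ' '] = pvOpenC v := by
  rcases h with rfl | rfl | rfl <;> rfl

theorem pv_bracket_close {v : String} (h : pvTrip v) :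
    [PySem.List.pyGetD (pvBRACKETS.getD v []) 1 ' '] = pvCloseC v := by
  rcases h with rfl | rfl | rfl <;> rfl

-- the per-string equivalence
theorem pv_seq_eq (s : String) (hP : pvPreStr s.toList = true) : pvSeqA s = pvSeqB s := by
  have hchars : ((pvOccB s.toList).items.foldl (pvPaintStep (pvP1 s.toList s.toList))
      (List.replicate s.toList.length ([] : List Char)))
      = pvCells (pvP1 s.toList s.toList) [] s.toList := by
    apply List.ext_getElem?
    intro k
    rw [pv_occ_items, pv_dedup_eq_new]
    cases hkn : s.toList[k]? with
    | none =>
      have hk : s.toList.length ≤ k := List.getElem?_eq_none_iff.mp hkn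
      rw [List.getElem?_eq_none (by rw [pv_paintfold_len, List.length_replicate]; exact hk)]
      rw [pv_cells_getElem? _ s.toList [] k, hkn]
      rfl
    | some n =>
      have hnseq : n ∈ s.toList := List.mem_of_getElem? hkn
      have hmem : n ∈ pvNew [] s.toList := pv_mem_new.mpr ⟨hnseq, by simp⟩
      rw [pv_paint_getElem? _ s.toList (pvNew [] s.toList) _ pv_nodup_new
        (fun c hc => (pv_mem_new.mp hc).1) (by rw [List.length_replicate]) k n hkn]
      rw [if_pos hmem]
      rw [pv_cells_getElem? _ s.toList [] k, hkn]
      simp only [Option.map_some, List.nil_append]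
      have hcont : (pvP1 s.toList s.toList).contains n = true := by
        rw [pvP1, pv_contains_foldl]
        simp [List.contains_eq_mem, hnseq]
      rw [PySem.Dict.contains_eq_isSome_get?] at hcont
      obtain ⟨v, hv⟩ := Option.isSome_iff_exists.mp hcont
      have htrip := pv_trip_foldl s.toList s.toList PySem.Dict.empty
        (fun c v h => by rw [PySem.Dict.get?_empty] at h; cases h) n v hv
      have hgd : (pvP1 s.toList s.toList).getD n "" = v :=
        PySem.Dict.getD_of_get?_eq_some _ _ hv
      rw [hgd]
      by_cases hmemT : n ∈ s.toList.take k
      · rw [if_pos hmemT, if_pos hmemT, pv_bracket_close htrip]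
      · rw [if_neg hmemT, if_neg hmemT, pv_bracket_open htrip]
  simp only [pvSeqA, pvSeqB]
  rw [show (s.toList.foldl (pvPermStep s.toList) PySem.Dict.empty) = pvP1 s.toList s.toList
    from rfl]
  rw [pv_cls_main s.toList hP]
  rw [hchars]
  rw [pv_emit_cells (pvP1 s.toList s.toList) s.toList [] []]
  rfl


-- ===== VERDICT (by name: the statement is the Claim_ definition above) =====
theorem sequenceToDB_spec : Claim_equal_sequenceToDB := by
  intro orderSeqs _ hpre
  unfold Spec_sequenceToDB sequenceToDB sequenceToDB_alt
  rw [PySem.List.foldl_append_singleton_eq_map, PySem.List.foldl_append_singleton_eq_map]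
  exact List.map_congr_left (fun s hs => pv_seq_eq s (hpre s hs))
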